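-- pv_equiv track=rewrite | github.com/nicolasn59/Beecrowd | Python/AD-HOC/2343 Caçadores de Mitos.py | raios_repetidos
-- ===== SOURCE A (Python) =====
-- def raios_repetidos(registros):
--     conjunto_quadrantes = set()  # CONJUNTO NÃO DEIXA ELEM repetidos
--     for raio in registros:
--         quadrante = f"{raio[0]}_{raio[1]}" # CONCATENANDO OS VALORES EM UMA ÚNICA STRING, O TEMPO DE EXECUÇÃO É REDUZIDO PELA METADE
--         if quadrante in conjunto_quadrantes:
--             return 1
--         conjunto_quadrantes.add(quadrante)
--     return 0
-- ===== SOURCE B (Python) =====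
-- def raios_repetidos(registros):
--     # Sort the string keys once, then a single adjacent-equality scan finds any repeat.
--     keys = sorted(f"{r[0]}_{r[1]}" for r in registros)
--     for prev, cur in zip(keys, keys[1:]):
--         if prev == cur:
--             return 1
--     return 0
-- ===== Notes on version B (the rewrite author's own statement) =====
-- stated objective: alternative
-- what changed: A scans once keeping a growing hash set of string keys with an early return on the first repeat; B builds the key list, sorts it, and detects a repeat by one adjacent-equality pass over the sorted keys.
import Mathlib
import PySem

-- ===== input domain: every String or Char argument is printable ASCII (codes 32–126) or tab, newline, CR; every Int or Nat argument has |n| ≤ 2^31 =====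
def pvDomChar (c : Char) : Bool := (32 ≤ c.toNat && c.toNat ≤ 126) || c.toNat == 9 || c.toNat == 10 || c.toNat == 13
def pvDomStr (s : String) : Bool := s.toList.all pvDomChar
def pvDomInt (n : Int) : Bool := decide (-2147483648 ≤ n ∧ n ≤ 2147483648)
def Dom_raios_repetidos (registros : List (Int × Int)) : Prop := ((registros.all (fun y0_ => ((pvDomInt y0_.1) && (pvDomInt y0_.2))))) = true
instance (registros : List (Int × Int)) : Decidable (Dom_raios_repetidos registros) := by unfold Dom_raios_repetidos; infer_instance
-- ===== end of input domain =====

-- B replaces A's incremental hash-set membership scan by sort-the-keys-then-compare-adjacent (alternative algorithm, not claimed faster).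

-- ===== PORT A =====
-- the f"{raio[0]}_{raio[1]}" key, as a list of characters (string facts are proved on the List Char side)
def pvKey (raio : Int × Int) : List Char :=
  PySem.Int.toChars raio.1 ++ '_' :: PySem.Int.toChars raio.2

-- the 'for raio in registros' loop of A, with the set accumulator and the early return
def raiosGoA (conjunto : PySem.Set (List Char)) : List (Int × Int) → Int
  | [] => 0
  | raio :: rest =>
      let quadrante := pvKey raio
      if PySem.Set.contains conjunto quadrante then 1
      else raiosGoA (PySem.Set.add conjunto quadrante) rest

def raios_repetidos (registros : List (Int × Int)) : Int :=
  raiosGoA PySem.Set.empty registros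

-- ===== PORT B =====
-- the adjacent-equality pass of B over the sorted key list
def raiosAdjB : List (List Char) → Int
  | [] => 0
  | [_] => 0
  | a :: b :: rest => if a = b then 1 else raiosAdjB (b :: rest)

def raios_repetidos_alt (registros : List (Int × Int)) : Int :=
  let keys := @PySem.List.sorted (List Char) (List Char) List.instLinearOrder.toLT
    LinearOrder.toDecidableLT (registros.map pvKey) (fun k => k) false
  raiosAdjB keys

-- ===== PRECONDITION & SPEC =====
def Spec_raios_repetidos (registros : List (Int × Int)) (out : Int) : Prop := out = raios_repetidos_alt registros
instance (registros : List (Int × Int)) (out : Int) : Decidable (Spec_raios_repetidos registros out) := by unfold Spec_raios_repetidos; infer_instance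

-- ===== CLAIM (what is proved, stated in full; the proofs are below) =====
def Claim_equal_raios_repetidos : Prop := ∀ (registros : List (Int × Int)), Dom_raios_repetidos registros → Spec_raios_repetidos registros (raios_repetidos registros)

-- ===== LEMMAS AND PROOFS =====

-- A's loop returns 0 exactly when the keys are pairwise distinct and none is already in the set.
theorem raiosGoA_eq (l : List (Int × Int)) :
    ∀ conjunto : PySem.Set (List Char),
      raiosGoA conjunto l =
        if (l.map pvKey).Nodup ∧ ∀ k ∈ l.map pvKey, k ∉ conjunto then 0 else 1 := by
  induction l with
  | nil => intro conjunto; simp [raiosGoA]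
  | cons r t ih =>
      intro conjunto
      by_cases hmem : pvKey r ∈ conjunto
      · rw [show raiosGoA conjunto (r :: t) = 1 by simp [raiosGoA, hmem]]
        rw [if_neg]
        rintro ⟨_, h⟩
        exact (h (pvKey r) (List.mem_cons_self ..)) hmem
      · rw [show raiosGoA conjunto (r :: t) =
              raiosGoA (PySem.Set.add conjunto (pvKey r)) t by simp [raiosGoA, hmem]]
        rw [ih]
        have hadd : ∀ k : List Char, k ∈ PySem.Set.add conjunto (pvKey r) ↔ k ∈ conjunto ∨ k = pvKey r := by
          intro k; exact PySem.Set.mem_add conjunto (pvKey r) k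
        by_cases h1 : (t.map pvKey).Nodup ∧ ∀ k ∈ t.map pvKey, k ∉ PySem.Set.add conjunto (pvKey r)
        · rw [if_pos h1, if_pos]
          refine ⟨List.nodup_cons.mpr ⟨?_, h1.1⟩, ?_⟩
          · intro hk; exact (h1.2 _ hk) ((hadd _).mpr (Or.inr rfl))
          · intro k hk
            rcases List.mem_cons.mp hk with h | h
            · subst h; exact hmem
            · intro hk'; exact (h1.2 _ h) ((hadd _).mpr (Or.inl hk'))
        · rw [if_neg h1, if_neg]
          rintro ⟨hn, hall⟩
          apply h1
          refine ⟨(List.nodup_cons.mp hn).2, ?_⟩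
          intro k hk hk'
          rcases (hadd k).mp hk' with h | h
          · exact hall k (List.mem_cons_of_mem _ hk) h
          · exact (List.nodup_cons.mp hn).1 (h ▸ hk)

-- the adjacent scan on a ≤-sorted list detects exactly a duplicate
theorem raiosAdjB_eq (s : List (List Char)) (hs : s.Pairwise (· ≤ ·)) :
    raiosAdjB s = if s.Nodup then 0 else 1 := by
  induction s with
  | nil => simp [raiosAdjB]
  | cons a t ih =>
      cases t with
      | nil => simp [raiosAdjB]
      | cons b u =>
          rcases List.pairwise_cons.mp hs with ⟨hale, htail⟩
          by_cases hab : a = b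
          · subst hab
            simp [raiosAdjB, List.nodup_cons]
          · rw [show raiosAdjB (a :: b :: u) = raiosAdjB (b :: u) by simp [raiosAdjB, hab]]
            rw [ih htail]
            congr 1
            rw [eq_iff_iff]
            constructor
            · intro h
              apply List.nodup_cons.mpr
              refine ⟨?_, h⟩
              intro hmem
              rcases List.mem_cons.mp hmem with rfl | hat
              · exact hab rfl
              · have hba : b ≤ a := (List.pairwise_cons.mp htail).1 a hat
                have hab' : a ≤ b := hale b (List.mem_cons_self ..)
                exact hab (le_antisymm hab' hba)
            · exact fun h => (List.nodup_cons.mp h).2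

-- ===== VERDICT (by name: the statement is the Claim_ definition above) =====
theorem raios_repetidos_spec : Claim_equal_raios_repetidos := by
  intro registros _
  show raios_repetidos registros = raios_repetidos_alt registros
  rw [show raios_repetidos registros = raiosGoA PySem.Set.empty registros from rfl]
  unfold raios_repetidos_alt
  rw [raiosGoA_eq]
  rw [raiosAdjB_eq _ (PySem.List.sorted_pairwise (registros.map pvKey) (fun k => k))]
  simp only [(@PySem.List.sorted_perm (List Char) (List Char) List.instLinearOrder.toLT
    LinearOrder.toDecidableLT (registros.map pvKey) (fun k => k) false).nodup_iff]
  simp [PySem.Set.empty]
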